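-- pv_equiv track=rewrite | github.com/comp110-25s/comp110-workspace-mareineb | class_lesson_practice/quiz3_practice.py | survivor
-- ===== SOURCE A (Python) =====
-- def survivor(votes: list[str]) -> str:
--     """Pick whoever has the most votes to kick them off."""
--     largest_count: int = 0
--     dict_frq: dict[str, int] = {}
--     for name in votes:
--         if name not in dict_frq:
--             dict_frq[name] = 1
--         elif name in dict_frq:
--             dict_frq[name] += 1
--     for name in dict_frq:
--         if dict_frq[name] > largest_count:
--             largest_count = dict_frq[name]
--     for name in dict_frq:
--         if dict_frq[name] == largest_count:
--             return name
-- ===== SOURCE B (Python) =====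
-- def survivor(votes: list[str]) -> str:
--     """Pick whoever has the most votes to kick them off."""
--     return max(votes, key=votes.count)
-- ===== Notes on version B (the rewrite author's own statement) =====
-- stated objective: idiomatic
-- what changed: Replaced the frequency dict and the two follow-up scans (find max count, find first key with that count) by the single builtin max(votes, key=votes.count), whose first-maximal rule matches A's first-appearance tie-break; Pre_ excludes the empty list, where A falls through and returns None (not a str) while B raises ValueError.
-- outside the precondition, e.g. on survivor([]): A returns None, B raises ValueError
import Mathlib
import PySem

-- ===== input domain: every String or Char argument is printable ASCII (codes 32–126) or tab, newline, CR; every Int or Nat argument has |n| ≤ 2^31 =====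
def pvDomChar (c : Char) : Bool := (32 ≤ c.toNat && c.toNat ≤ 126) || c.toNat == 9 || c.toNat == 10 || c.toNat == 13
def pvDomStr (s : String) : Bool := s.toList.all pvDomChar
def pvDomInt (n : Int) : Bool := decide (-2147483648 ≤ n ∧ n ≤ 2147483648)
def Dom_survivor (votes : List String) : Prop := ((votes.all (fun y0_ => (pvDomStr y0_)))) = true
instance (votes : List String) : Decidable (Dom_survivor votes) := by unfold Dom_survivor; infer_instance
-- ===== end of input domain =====

-- B replaces A's frequency dict and two follow-up scans by the builtin max(votes, key=votes.count)
-- (idiomatic; first-maximal element = A's first-appearing most-frequent name).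

-- ===== PORT A =====
def survivor (votes : List String) : String :=
  let largest_count : Int := 0
  let dict_frq : PySem.Dict String Int := PySem.Dict.empty
  let dict_frq := votes.foldl (fun d name =>
    if ¬ (d.contains name) then d.insert name 1
    else if d.contains name then d.modify name 0 (· + 1)
    else d) dict_frq
  let largest_count := dict_frq.keys.foldl (fun lc name =>
    if dict_frq.getD name 0 > lc then dict_frq.getD name 0 else lc) largest_count
  -- Python's final 'for … : return name' loop; it falls through (returning None, not a str)
  -- only when votes = [], which Pre_survivor excludes; the port returns "" there.
  ((dict_frq.keys.find? (fun name => dict_frq.getD name 0 == largest_count)).getD "")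

-- ===== PORT B =====
def survivor_alt (votes : List String) : String :=
  -- max(votes, key=votes.count); on [] Python raises ValueError (outside Pre_), the port returns ""
  (PySem.List.max? votes (fun name => PySem.List.count votes name)).getD ""

-- ===== PRECONDITION & SPEC =====
-- Pre_ excludes only the empty list: there A falls through its loops and returns None (not a str),
-- and B's bare max([]) raises ValueError.
def Pre_survivor (votes : List String) : Prop := votes ≠ []
instance (votes : List String) : Decidable (Pre_survivor votes) := by unfold Pre_survivor; infer_instance
def pvWitness_survivor : List String := (["ana", "bo", "ana"])
def Spec_survivor (votes : List String) (out : String) : Prop := out = survivor_alt votes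
instance (votes : List String) (out : String) : Decidable (Spec_survivor votes out) := by unfold Spec_survivor; infer_instance

-- ===== CLAIM (what is proved, stated in full; the proofs are below) =====
def Claim_equal_survivor : Prop := ∀ (votes : List String), Dom_survivor votes → Pre_survivor votes → Spec_survivor votes (survivor votes)

-- ===== LEMMAS AND PROOFS =====

-- running "first max" of Python's max(): start at a, replace only on strictly larger key
def pvGo {α : Type} (key : α → Nat) (a : α) (t : List α) : α :=
  t.foldl (fun m x => if key m < key x then x else m) a

theorem pvGo_aux {α : Type} (key : α → Nat) (t : List α) (a : α) :
    t.foldl (fun acc x => match acc with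
      | none => some x
      | some m => if key m < key x then some x else some m) (some a)
      = some (pvGo key a t) := by
  induction t generalizing a with
  | nil => rfl
  | cons x t ih =>
      simp only [List.foldl_cons, pvGo]
      by_cases h : key a < key x <;> simp [h, ih, pvGo]

theorem max?_cons_go {α : Type} (key : α → Nat) (a : α) (t : List α) :
    PySem.List.max? (a :: t) key = some (pvGo key a t) := by
  simp only [PySem.List.max?, List.foldl_cons]
  exact pvGo_aux key t a

theorem pvGo_first {α : Type} (key : α → Nat) (t : List α) (a : α) :
    ((a :: t).find? (fun y => key y == key (pvGo key a t)) = some (pvGo key a t)) ∧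
      ∀ y ∈ a :: t, key y ≤ key (pvGo key a t) := by
  induction t generalizing a with
  | nil => simp [pvGo]
  | cons x t ih =>
      have hgo : pvGo key a (x :: t) = pvGo key (if key a < key x then x else a) t := by
        simp [pvGo]
      by_cases h : key a < key x
      · -- a is strictly beaten by x, hence by the final result
        simp only [h, if_true] at hgo
        obtain ⟨ihf, ihle⟩ := ih x
        have hxle : key x ≤ key (pvGo key x t) := ihle x (by simp)
        have hane : ¬ (key a == key (pvGo key x t)) = true := by
          simp only [beq_iff_eq]; omega
        constructor
        · rw [hgo, List.find?_cons]
          simp only [hane]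
          simpa using ihf
        · intro y hy
          rcases List.mem_cons.mp hy with rfl | hy
          · rw [hgo]; omega
          · rw [hgo]; exact ihle y hy
      · simp only [h, if_false] at hgo
        obtain ⟨ihf, ihle⟩ := ih a
        have hale : key a ≤ key (pvGo key a t) := ihle a (by simp)
        have hxa : key x ≤ key a := by omega
        constructor
        · rw [hgo]
          rw [List.find?_cons] at ihf ⊢
          by_cases hpa : (key a == key (pvGo key a t)) = true
          · simpa [hpa] using ihf
          · have hpx : ¬ (key x == key (pvGo key a t)) = true := by
              simp only [beq_iff_eq] at hpa ⊢; omega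
            simp only [hpa] at ihf ⊢
            rw [List.find?_cons]
            simp only [hpx]
            exact ihf
        · intro y hy
          rcases List.mem_cons.mp hy with rfl | hy
          · rw [hgo]; omega
          · rcases List.mem_cons.mp hy with rfl | hy
            · rw [hgo]; omega
            · rw [hgo]; exact ihle y (List.mem_cons_of_mem _ hy)

-- find? commutes with ordered dedup (PySem.Set.ofList keeps first occurrences in order)
theorem find?_foldl_add {α : Type} [BEq α] [LawfulBEq α] (p : α → Bool) (xs : List α) (s : List α) :
    List.find? p (xs.foldl PySem.Set.add s) = (List.find? p s).or (List.find? p xs) := by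
  induction xs generalizing s with
  | nil => simp
  | cons x t ih =>
      simp only [List.foldl_cons]
      by_cases hmem : x ∈ s
      · have hadd : PySem.Set.add s x = s := by
          simp [PySem.Set.add, PySem.Set.contains, hmem]
        rw [hadd, ih, List.find?_cons]
        by_cases hpx : p x = true
        · -- if nothing in s satisfies p yet x ∈ s does, contradiction
          cases hfs : List.find? p s with
          | some a => simp [hpx]
          | none =>
              exfalso
              have := List.find?_eq_none.mp hfs x hmem
              simp [hpx] at this
        · simp [hpx]
      · have hadd : PySem.Set.add s x = s ++ [x] := by
          simp [PySem.Set.add, PySem.Set.contains, hmem]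
        rw [hadd, ih, List.find?_append, List.find?_cons]
        cases hfs : List.find? p s with
        | some a => simp
        | none =>
            by_cases hpx : p x = true <;> simp [hpx]

theorem ofList_find? {α : Type} [BEq α] [LawfulBEq α] (p : α → Bool) (xs : List α) :
    List.find? p (PySem.Set.ofList xs) = List.find? p xs := by
  rw [PySem.Set.ofList_eq_foldl, find?_foldl_add]
  simp

-- A's counting loop builds exactly Counter(votes)
theorem dict_eq_counter (votes : List String) :
    votes.foldl (fun d name =>
      if ¬ (d.contains name) then d.insert name 1
      else if d.contains name then d.modify name 0 (· + 1)
      else d) PySem.Dict.empty = PySem.Dict.counter votes := by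
  rw [PySem.Dict.counter]
  apply PySem.List.foldl_congr_mem
  intro d name _
  by_cases hc : d.contains name = true
  · simp [hc, PySem.Dict.modify]
  · have hget : d.getD name 0 = 0 := by
      simp only [PySem.Dict.getD, PySem.Dict.get?]
      have : List.find? (fun p => p.1 == name) d.items = none := by
        rw [List.find?_eq_none]
        intro q hq
        simp only [PySem.Dict.contains, List.any_eq_true] at hc
        intro hb; exact hc ⟨q, hq, hb⟩
      simp [this]
    simp only [hc, PySem.Dict.modify, hget]
    norm_num

-- a running max attains its value at a member unless it stays at the seed
theorem foldl_max_attain {α : Type} (l : List α) (f : α → Int) (a : Int) :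
    l.foldl (fun acc y => max acc (f y)) a = a ∨
      ∃ y ∈ l, l.foldl (fun acc y => max acc (f y)) a = f y := by
  induction l generalizing a with
  | nil => left; rfl
  | cons x t ih =>
      simp only [List.foldl_cons]
      rcases ih (max a (f x)) with h | ⟨y, hy, h⟩
      · rcases max_choice a (f x) with hm | hm
        · left; rw [h, hm]
        · right; exact ⟨x, by simp, by rw [h, hm]⟩
      · right; exact ⟨y, List.mem_cons_of_mem _ hy, h⟩

theorem survivor_eq (votes : List String) (h : votes ≠ []) :
    survivor votes = survivor_alt votes := by
  obtain ⟨v, t, rfl⟩ := List.exists_cons_of_ne_nil h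
  set key : String → Nat := fun x => PySem.List.count (v :: t) x with hkey
  set g : String := pvGo key v t with hg
  obtain ⟨hfind, hle⟩ := pvGo_first key t v
  have hgmem : g ∈ v :: t := List.mem_of_find?_eq_some hfind
  -- unfold A and rewrite its dict to Counter(votes)
  simp only [survivor, dict_eq_counter, PySem.Dict.keys_counter]
  -- the max-finding loop computes a running max of the counts over the deduped keys
  have hstep : List.foldl (fun lc name =>
        if (PySem.Dict.counter (v :: t)).getD name 0 > lc
        then (PySem.Dict.counter (v :: t)).getD name 0 else lc) 0
        (PySem.Set.ofList (v :: t))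
      = List.foldl (fun lc name => max lc ((List.count name (v :: t) : Int))) 0
        (PySem.Set.ofList (v :: t)) := by
    apply PySem.List.foldl_congr_mem
    intro acc x _
    rw [PySem.Dict.getD_counter]
    rcases max_choice acc ((List.count x (v :: t) : Int)) with hm | hm <;>
      · rw [hm]; split_ifs <;> omega
  rw [hstep]
  set M : Int := List.foldl (fun lc name => max lc ((List.count name (v :: t) : Int))) 0
      (PySem.Set.ofList (v :: t)) with hM
  -- M is an upper bound of the counts and is attained (votes nonempty), hence M = key g
  obtain ⟨hinit, hub⟩ := PySem.List.le_foldl_max_int (PySem.Set.ofList (v :: t))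
      (fun name => ((List.count name (v :: t) : Int))) 0
  have hMg : M = (key g : Int) := by
    have hgub : (key g : Int) ≤ M := by
      have := hub g ((PySem.Set.mem_ofList _ _).mpr hgmem)
      simpa [hkey, PySem.List.count_eq] using this
    rcases foldl_max_attain (PySem.Set.ofList (v :: t))
        (fun name => ((List.count name (v :: t) : Int))) 0 with h0 | ⟨y, hy, hyv⟩
    · exfalso
      have hvmem : v ∈ PySem.Set.ofList (v :: t) := by
        rw [PySem.Set.mem_ofList]; simp
      have := hub v hvmem
      have hpos : 0 < List.count v (v :: t) := List.count_pos_iff.mpr (by simp)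
      rw [← hM] at this h0
      omega
    · have hyle : (List.count y (v :: t) : Int) ≤ (List.count g (v :: t) : Int) := by
        have := hle y ((PySem.Set.mem_ofList _ _).mp hy)
        simp only [hkey, PySem.List.count_eq] at this
        exact_mod_cast this
      have hkg : (key g : Int) = (List.count g (v :: t) : Int) := by
        simp [hkey, PySem.List.count_eq]
      rw [← hM] at hyv
      omega
  -- the final scan over the deduped keys is the first-max scan over votes itself
  have hpred : (fun name => ((PySem.Dict.counter (v :: t)).getD name 0 == M))
      = (fun y => key y == key g) := by
    funext x
    rw [PySem.Dict.getD_counter, hMg]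
    simp [hkey, PySem.List.count_eq]
  rw [hpred, ofList_find?, hfind]
  -- B's side: max? of a nonempty list is pvGo
  simp only [survivor_alt, max?_cons_go, hkey, Option.getD_some]

-- ===== VERDICT (by name: the statement is the Claim_ definition above) =====
theorem survivor_spec : Claim_equal_survivor := by
  intro votes _ hpre
  unfold Spec_survivor
  exact survivor_eq votes hpre
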